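-- pv_equiv track=rewrite | github.com/Mielecki/Minimalizacja | minimalizacja.py | remove_negations
-- ===== SOURCE A (Python) =====
-- def remove_negations(e):
--     flag = False
--     to_change = []
--     for indx, ch in enumerate(e):
--         if ch == '~' and not flag:
--             flag = True
--         elif ch != '~' and flag:
--             flag = False
--         elif ch == '~' and flag:
--             to_change.append(indx-1)
--             to_change.append(indx)
--             flag = False
--
--     for indx in to_change:
--         e = e[:indx] + " " + e[indx + 1:]
--     return e.replace(" ", "")
-- ===== SOURCE B (Python) =====
-- def remove_negations(e):
--     # Single pass with a pending-tilde flag: adjacent double-negation pairs cancel, spaces are dropped.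
--     out = []
--     pending = False
--     for ch in e:
--         if ch == '~':
--             pending = not pending
--         else:
--             if pending:
--                 out.append('~')
--                 pending = False
--             if ch != ' ':
--                 out.append(ch)
--     if pending:
--         out.append('~')
--     return ''.join(out)
-- ===== Notes on version B (the rewrite author's own statement) =====
-- stated objective: alternative
-- what changed: Replaced A's two-phase scheme (collect marked indices, rebuild the string by slicing once per marked index, then strip spaces with replace) by a single pass with a pending-tilde flag that emits the output directly.
import Mathlib
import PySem

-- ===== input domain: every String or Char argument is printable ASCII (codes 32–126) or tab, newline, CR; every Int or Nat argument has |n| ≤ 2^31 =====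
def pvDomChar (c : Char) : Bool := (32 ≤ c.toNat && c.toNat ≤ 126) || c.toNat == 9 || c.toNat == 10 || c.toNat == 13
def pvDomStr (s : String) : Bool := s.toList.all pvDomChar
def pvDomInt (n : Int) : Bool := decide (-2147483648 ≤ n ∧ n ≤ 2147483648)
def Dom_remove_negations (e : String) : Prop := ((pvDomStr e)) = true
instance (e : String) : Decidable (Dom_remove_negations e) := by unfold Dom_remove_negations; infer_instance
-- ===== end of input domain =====

-- B replaces A's marked-index collection + per-index slice rebuilds + replace by a
-- single pass with a pending-tilde flag (alternative algorithm); return values agree on all inputs.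

-- ===== PORT A =====
-- the first loop of A: collect indices of cancelling '~~' pairs
def pvAStep (s : Bool × List Int) (q : Int × Char) : Bool × List Int :=
  if q.2 = '~' ∧ ¬ s.1 then (true, s.2)
  else if q.2 ≠ '~' ∧ s.1 then (false, s.2)
  else if q.2 = '~' ∧ s.1 then (false, s.2 ++ [q.1 - 1, q.1])
  else (s.1, s.2)

def remove_negations (e : String) : String :=
  let r := (PySem.List.enumerate e.toList 0).foldl pvAStep (false, [])
  let to_change := r.2
  let e' := to_change.foldl
    (fun (s : List Char) (indx : Int) =>
      PySem.List.slice s none (some indx) ++ [' '] ++ PySem.List.slice s (some (indx + 1)) none)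
    e.toList
  String.ofList (PySem.Chars.replace e' [' '] [])

-- ===== PORT B =====
def pvBStep (s : Bool × List Char) (ch : Char) : Bool × List Char :=
  if ch = '~' then (!s.1, s.2)
  else
    let out := if s.1 then s.2 ++ ['~'] else s.2
    (false, if ch ≠ ' ' then out ++ [ch] else out)

def remove_negations_alt (e : String) : String :=
  let r := e.toList.foldl pvBStep (false, [])
  String.ofList (if r.1 then r.2 ++ ['~'] else r.2)

-- ===== PRECONDITION & SPEC =====
def Spec_remove_negations (e : String) (out : String) : Prop := out = remove_negations_alt e
instance (e : String) (out : String) : Decidable (Spec_remove_negations e out) := by unfold Spec_remove_negations; infer_instance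

-- ===== CLAIM (what is proved, stated in full; the proofs are below) =====
def Claim_equal_remove_negations : Prop := ∀ (e : String), Dom_remove_negations e → Spec_remove_negations e (remove_negations e)

-- ===== LEMMAS AND PROOFS =====

-- indices marked by A's first loop, started at position n with flag p
def pvMarks (n : Int) (p : Bool) : List Char → List Int
  | [] => []
  | c :: cs =>
    if c = '~' ∧ ¬ p then pvMarks (n + 1) true cs
    else if c ≠ '~' ∧ p then pvMarks (n + 1) false cs
    else if c = '~' ∧ p then (n - 1) :: n :: pvMarks (n + 1) false cs
    else pvMarks (n + 1) p cs

-- A's flag after consuming cs from flag p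
def pvFlag (p : Bool) : List Char → Bool
  | [] => p
  | c :: cs =>
    if c = '~' ∧ ¬ p then pvFlag true cs
    else if c ≠ '~' ∧ p then pvFlag false cs
    else if c = '~' ∧ p then pvFlag false cs
    else pvFlag p cs

-- the common specification: output of the suffix, pending-tilde flag p
def pvG (p : Bool) : List Char → List Char
  | [] => if p then ['~'] else []
  | c :: cs =>
    if c = '~' then pvG (!p) cs
    else (if p then ['~'] else []) ++ (if c ≠ ' ' then [c] else []) ++ pvG false cs

theorem pvMarks_lb (cs : List Char) (n : Int) (p : Bool) (i : Int)
    (h : i ∈ pvMarks n p cs) : (if p then n - 1 else n) ≤ i := by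
  induction cs generalizing n p with
  | nil => simp [pvMarks] at h
  | cons c cs ih =>
    unfold pvMarks at h
    split_ifs at h with h1 h2 h3
    · have := ih (n + 1) true h
      simp at this ⊢; split <;> omega
    · have := ih (n + 1) false h
      simp at this ⊢; split <;> omega
    · simp at h
      rcases h with h | h | h
      · simp [h3.2]; omega
      · simp [h3.2]; omega
      · have := ih (n + 1) false h
        simp at this; simp [h3.2]; omega
    · have := ih (n + 1) p h
      split at this <;> split <;> omega

theorem pvMarks_ub (cs : List Char) (n : Int) (p : Bool) (i : Int)
    (h : i ∈ pvMarks n p cs) : i < n + cs.length := by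
  induction cs generalizing n p with
  | nil => simp [pvMarks] at h
  | cons c cs ih =>
    unfold pvMarks at h
    simp only [List.length_cons]
    split_ifs at h with h1 h2 h3
    · have := ih (n + 1) true h; push_cast at this ⊢; omega
    · have := ih (n + 1) false h; push_cast at this ⊢; omega
    · simp at h
      rcases h with h | h | h
      · push_cast; omega
      · push_cast; omega
      · have := ih (n + 1) false h; push_cast at this ⊢; omega
    · have := ih (n + 1) p h; push_cast at this ⊢; omega

-- A's first loop computes pvMarks
theorem pvLoop1 (cs : List Char) (n : Int) (p : Bool) (tc : List Int) :
    (PySem.List.enumerate cs n).foldl pvAStep (p, tc)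
      = (pvFlag p cs, tc ++ pvMarks n p cs) := by
  induction cs generalizing n p tc with
  | nil => simp [PySem.List.enumerate_nil, pvFlag, pvMarks]
  | cons c cs ih =>
    rw [PySem.List.enumerate_cons]
    simp only [List.foldl_cons]
    unfold pvFlag pvMarks
    by_cases hc : c = '~' <;> cases p
    · have hs : pvAStep (false, tc) (n, c) = (true, tc) := by simp [pvAStep, hc]
      rw [hs, ih]; simp [hc]
    · have hs : pvAStep (true, tc) (n, c) = (false, tc ++ [n - 1, n]) := by
        simp [pvAStep, hc]
      rw [hs, ih]; simp [hc]
    · have hs : pvAStep (false, tc) (n, c) = (false, tc) := by simp [pvAStep, hc]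
      rw [hs, ih]; simp [hc]
    · have hs : pvAStep (true, tc) (n, c) = (false, tc) := by simp [pvAStep, hc]
      rw [hs, ih]; simp [hc]

-- A's second loop: with in-range indices, each step sets one position to ' '
theorem pvLoop2 (tc : List Int) (l : List Char)
    (hr : ∀ i ∈ tc, 0 ≤ i ∧ i < l.length) :
    tc.foldl
      (fun (s : List Char) (indx : Int) =>
        PySem.List.slice s none (some indx) ++ [' '] ++ PySem.List.slice s (some (indx + 1)) none)
      l
    = tc.foldl (fun (s : List Char) (indx : Int) => s.set indx.toNat ' ') l := by
  induction tc generalizing l with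
  | nil => rfl
  | cons i tc ih =>
    obtain ⟨h0, hl⟩ := hr i (by simp)
    simp only [List.foldl_cons]
    have hstep : PySem.List.slice l none (some i) ++ [' '] ++ PySem.List.slice l (some (i + 1)) none
        = l.set i.toNat ' ' := by
      rw [PySem.List.slice_to l h0, PySem.List.slice_from l (show (0:Int) ≤ i + 1 by omega)]
      have h1 : (i + 1).toNat = i.toNat + 1 := by omega
      rw [h1, List.set_eq_take_append_cons_drop, if_pos (show i.toNat < l.length by omega)]
      simp
    rw [hstep]
    exact ih _ (fun j hj => by
      have := hr j (by simp [hj]); simpa using this)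

theorem pvSetFold_length (tc : List Int) (l : List Char) :
    (tc.foldl (fun (s : List Char) (indx : Int) => s.set indx.toNat ' ') l).length
      = l.length := by
  induction tc generalizing l with
  | nil => rfl
  | cons i tc ih => simp [List.foldl_cons, ih]


-- elementwise value of the set-fold
theorem pvSetFold_getElem (tc : List Int) (l : List Char) (k : Nat) (hk : k < l.length)
    (hr : ∀ i ∈ tc, 0 ≤ i ∧ i < l.length) :
    (tc.foldl (fun (s : List Char) (indx : Int) => s.set indx.toNat ' ') l)[k]'(by
      rw [pvSetFold_length] ; exact hk)
    = if (k : Int) ∈ tc then ' ' else l[k] := by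
  induction tc generalizing l with
  | nil => simp
  | cons i tc ih =>
    obtain ⟨h0, hl⟩ := hr i (by simp)
    simp only [List.foldl_cons]
    rw [ih (l.set i.toNat ' ') (by simpa using hk)
      (fun j hj => by have := hr j (by simp [hj]); simpa using this)]
    by_cases hki : (k : Int) = i
    · have : i.toNat = k := by omega
      simp [this, hki]
    · have : i.toNat ≠ k := by omega
      simp [this, hki]

-- the set-fold as a map over the enumeration
theorem pvSetFold_eq_map (tc : List Int) (l : List Char)
    (hr : ∀ i ∈ tc, 0 ≤ i ∧ i < l.length) :
    tc.foldl (fun (s : List Char) (indx : Int) => s.set indx.toNat ' ') l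
      = (PySem.List.enumerate l 0).map (fun q => if q.1 ∈ tc then ' ' else q.2) := by
  apply List.ext_getElem
  · simp [pvSetFold_length, PySem.List.length_enumerate]
  · intro k h1 h2
    have hk : k < l.length := by simpa [pvSetFold_length] using h1
    rw [pvSetFold_getElem tc l k hk hr]
    rw [List.getElem_map, PySem.List.getElem_enumerate]
    simp

-- replace(old=" ", new="") is filtering spaces out
theorem pvReplaceGo (fuel : Nat) (l acc : List Char) (hf : l.length ≤ fuel) :
    PySem.Chars.replace.go [' '] [] fuel l acc
      = acc.reverse ++ l.filter (fun c => decide (c ≠ ' ')) := by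
  induction fuel generalizing l acc with
  | zero =>
    have : l = [] := by cases l <;> simp_all
    simp [this, PySem.Chars.replace.go]
  | succ fuel ih =>
    cases l with
    | nil => simp [PySem.Chars.replace.go]
    | cons c t =>
      rw [PySem.Chars.replace.go]
      by_cases hc : c = ' '
      · have hpre : [' '].isPrefixOf (c :: t) = true := by simp [List.isPrefixOf, hc]
        rw [if_pos hpre]
        simp only [List.length_cons, List.length_nil, List.drop_succ_cons, List.drop_zero,
          List.reverse_nil, List.nil_append]
        rw [ih t acc (by simpa using hf)]
        simp [hc]
      · have hpre : ¬ ([' '].isPrefixOf (c :: t) = true) := by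
          simp [List.isPrefixOf]; exact fun h => hc h.symm
        rw [if_neg hpre]
        rw [ih t (c :: acc) (by simpa using hf)]
        simp [hc]

theorem pvReplace_filter (l : List Char) :
    PySem.Chars.replace l [' '] [] = l.filter (fun c => decide (c ≠ ' ')) := by
  rw [PySem.Chars.replace]
  simp only [List.isEmpty_cons, Bool.false_eq_true, if_false]
  exact pvReplaceGo l.length l [] le_rfl

-- congruence of the enumerate-map on indices ≥ m
theorem pvMapEnum_congr (cs : List Char) (m : Int)
    (f g : Int × Char → Char)
    (h : ∀ i c, m ≤ i → f (i, c) = g (i, c)) :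
    (PySem.List.enumerate cs m).map f = (PySem.List.enumerate cs m).map g := by
  apply List.map_congr_left
  intro q hq
  rw [PySem.List.mem_enumerate_iff] at hq
  obtain ⟨k, hk, rfl⟩ := hq
  exact h _ _ (by omega)

-- MAIN A-side lemma: the marked-then-space-filtered suffix equals pvG
theorem pvMain (cs : List Char) (n : Int) (p : Bool) :
    (if p = true ∧ (n - 1) ∉ pvMarks n p cs then ['~'] else [])
      ++ ((PySem.List.enumerate cs n).map
            (fun q => if q.1 ∈ pvMarks n p cs then ' ' else q.2)).filter
          (fun c => decide (c ≠ ' '))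
    = pvG p cs := by
  induction cs generalizing n p with
  | nil =>
    cases p <;> simp [pvMarks, pvG, PySem.List.enumerate_nil]
  | cons c cs ih =>
    rw [PySem.List.enumerate_cons]
    by_cases hc : c = '~'
    · cases p with
      | true =>
        have hm : pvMarks n true (c :: cs) = (n - 1) :: n :: pvMarks (n + 1) false cs := by
          simp [pvMarks, hc]
        have hlb : ∀ i ∈ pvMarks (n + 1) false cs, n + 1 ≤ i := by
          intro i hi; have := pvMarks_lb cs (n + 1) false i hi; simpa using this
        rw [hm]
        have hcong : (PySem.List.enumerate cs (n + 1)).map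
              (fun q => if q.1 ∈ (n - 1) :: n :: pvMarks (n + 1) false cs then ' ' else q.2)
            = (PySem.List.enumerate cs (n + 1)).map
              (fun q => if q.1 ∈ pvMarks (n + 1) false cs then ' ' else q.2) := by
          apply pvMapEnum_congr
          intro i ch hi
          by_cases hmem : i ∈ pvMarks (n + 1) false cs
          · simp [hmem]
          · have h1 : i ≠ n - 1 := by have := hlb i; omega
            have h2 : i ≠ n := by have := hlb i; omega
            simp [hmem, h1, h2]
        simp only [List.map_cons, List.filter_cons]
        rw [hcong]
        have hthis := ih (n + 1) false
        simp only [Bool.false_eq_true, false_and, if_false, List.nil_append] at hthis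
        simp only [decide_not] at hthis
        simp only [pvG, hc]
        simp [hthis]
      | false =>
        have hm : pvMarks n false (c :: cs) = pvMarks (n + 1) true cs := by
          simp [pvMarks, hc]
        rw [hm]
        simp only [List.map_cons, List.filter_cons]
        have hthis := ih (n + 1) true
        have hn1 : (n + 1 : Int) - 1 = n := by omega
        rw [hn1] at hthis
        simp only [pvG, hc, Bool.not_false]
        rw [← hthis]
        simp only [Bool.false_eq_true, false_and, if_false, List.nil_append, true_and]
        by_cases hmem : (n : Int) ∈ pvMarks (n + 1) true cs
        · simp [hmem]
        · simp [hmem]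
    · have hm : pvMarks n p (c :: cs) = pvMarks (n + 1) false cs := by
        cases p <;> simp [pvMarks, hc]
      have hlb : ∀ i ∈ pvMarks (n + 1) false cs, n + 1 ≤ i := by
        intro i hi; have := pvMarks_lb cs (n + 1) false i hi; simpa using this
      rw [hm]
      simp only [List.map_cons, List.filter_cons]
      have hnotmem : (n : Int) ∉ pvMarks (n + 1) false cs := by
        intro h; have := hlb n h; omega
      have hn1 : (n : Int) - 1 ∉ pvMarks (n + 1) false cs := by
        intro h; have := hlb _ h; omega
      have hhead : (if (n : Int) ∈ pvMarks (n + 1) false cs then ' ' else c) = c := by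
        simp [hnotmem]
      rw [hhead]
      have hthis := ih (n + 1) false
      simp only [Bool.false_eq_true, false_and, if_false, List.nil_append] at hthis
      simp only [decide_not] at hthis
      simp only [pvG, if_neg hc]
      cases p with
      | true =>
        rw [if_pos (show true = true ∧ (n : Int) - 1 ∉ pvMarks (n + 1) false cs from ⟨rfl, hn1⟩)]
        by_cases hsp : c = ' '
        · simp [hsp, hthis]
        · simp [hsp, hthis]
      | false =>
        simp only [Bool.false_eq_true, false_and, if_false, List.nil_append]
        by_cases hsp : c = ' '
        · simp [hsp, hthis]
        · simp [hsp, hthis]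

-- B's fold computes pvG
theorem pvBFold (cs : List Char) (p : Bool) (acc : List Char) :
    (let r := cs.foldl pvBStep (p, acc)
     if r.1 then r.2 ++ ['~'] else r.2) = acc ++ pvG p cs := by
  induction cs generalizing p acc with
  | nil => cases p <;> simp [pvG]
  | cons c cs ih =>
    simp only [List.foldl_cons]
    by_cases hc : c = '~'
    · simp only [pvBStep, hc]
      rw [ih]
      simp [pvG]
    · simp only [pvBStep, if_neg hc]
      rw [ih]
      cases p with
      | true =>
        by_cases hsp : c = ' ' <;> simp [pvG, hc, hsp]
      | false =>
        by_cases hsp : c = ' ' <;> simp [pvG, hc, hsp]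

-- ===== VERDICT (by name: the statement is the Claim_ definition above) =====
theorem remove_negations_spec : Claim_equal_remove_negations := by
  intro e _
  unfold Spec_remove_negations remove_negations remove_negations_alt
  set l := e.toList with hl
  have hr : ∀ i ∈ pvMarks 0 false l, 0 ≤ i ∧ i < l.length := by
    intro i hi
    have h1 := pvMarks_lb l 0 false i hi
    have h2 := pvMarks_ub l 0 false i hi
    simp at h1
    omega
  rw [pvLoop1 l 0 false []]
  simp only [List.nil_append]
  rw [pvLoop2 _ _ hr, pvSetFold_eq_map _ _ hr, pvReplace_filter]
  have hmain := pvMain l 0 false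
  simp only [Bool.false_eq_true, false_and, if_false, List.nil_append] at hmain
  rw [hmain]
  rw [pvBFold l false []]
  simp
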